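-- pv_equiv track=rewrite | github.com/rendiffdev/rendiff-dev | worker/utils/ffmpeg.py | _escape_metadata_field
-- ===== SOURCE A (Python) =====
-- def _escape_metadata_field(field: str) -> str:
--     """Escape metadata field for FFmpeg command safety."""
--     if not isinstance(field, str):
--         field = str(field)
--
--     # Remove or escape dangerous characters
--     dangerous_chars = ['|', ';', '&', '$', '`', '<', '>', '"', "'", '\\', '\n', '\r', '\t']
--     for char in dangerous_chars:
--         field = field.replace(char, '_')
--
--     # Limit length
--     if len(field) > 255:
--         field = field[:255]
--
--     return field
-- ===== SOURCE B (Python) =====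
-- def _escape_metadata_field(field: str) -> str:
--     """Escape metadata field for FFmpeg command safety."""
--     if not isinstance(field, str):
--         field = str(field)
--     dangerous = set('|;&$`<>"\'\\\n\r\t')
--     # one pass over the characters instead of 13 sequential full-string replaces
--     return ''.join('_' if c in dangerous else c for c in field)[:255]
-- ===== Notes on version B (the rewrite author's own statement) =====
-- stated objective: simpler
-- what changed: Replaced the loop of 13 sequential full-string str.replace scans by a single per-character pass against a set of dangerous characters, with an unconditional [:255] truncation.
import Mathlib
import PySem

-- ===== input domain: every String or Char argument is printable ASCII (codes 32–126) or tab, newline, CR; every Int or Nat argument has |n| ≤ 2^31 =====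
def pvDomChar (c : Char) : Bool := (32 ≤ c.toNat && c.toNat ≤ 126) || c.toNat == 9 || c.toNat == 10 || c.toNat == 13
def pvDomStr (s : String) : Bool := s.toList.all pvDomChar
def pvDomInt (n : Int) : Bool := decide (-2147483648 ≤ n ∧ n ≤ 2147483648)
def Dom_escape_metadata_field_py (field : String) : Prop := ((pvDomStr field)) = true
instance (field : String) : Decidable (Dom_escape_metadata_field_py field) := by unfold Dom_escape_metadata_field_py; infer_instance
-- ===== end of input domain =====

-- B replaces A's 13 sequential full-string replace scans by one per-character pass; objective: simpler.

-- ===== PORT A =====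
-- the dangerous_chars list of A, each entry a one-character string
def dangerousStringsA : List String :=
  ["|", ";", "&", "$", "`", "<", ">", "\"", "'", "\\", "\n", "\r", "\t"]

def escape_metadata_field_py (field : String) : String :=
  -- for char in dangerous_chars: field = field.replace(char, '_')
  let f := dangerousStringsA.foldl (fun s ch => PySem.Str.replace s ch "_") field
  -- if len(field) > 255: field = field[:255]
  if 255 < PySem.Str.len f then String.ofList (PySem.Chars.slice f.toList none (some 255)) else f

-- ===== PORT B =====
-- dangerous = set('|;&$`<>"\'\\\n\r\t')
def dangerousCharsB : PySem.Set Char :=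
  PySem.Set.ofList "|;&$`<>\"'\\\n\r\t".toList

-- ''.join('_' if c in dangerous else c for c in field)[:255]
def escape_metadata_field_py_alt (field : String) : String :=
  String.ofList
    (PySem.Chars.slice
      (field.toList.map (fun c => if dangerousCharsB.contains c then '_' else c))
      none (some 255))

-- ===== PRECONDITION & SPEC =====
def Spec_escape_metadata_field_py (field : String) (out : String) : Prop := out = escape_metadata_field_py_alt field
instance (field : String) (out : String) : Decidable (Spec_escape_metadata_field_py field out) := by unfold Spec_escape_metadata_field_py; infer_instance

-- ===== CLAIM (what is proved, stated in full; the proofs are below) =====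
def Claim_equal_escape_metadata_field_py : Prop := ∀ (field : String), Dom_escape_metadata_field_py field → Spec_escape_metadata_field_py field (escape_metadata_field_py field)

-- ===== LEMMAS AND PROOFS =====

-- the per-character substitution performed by replacing the single character c with '_'
def repChar (c x : Char) : Char := if x = c then '_' else x

lemma replace_go_single (c : Char) :
    ∀ (l : List Char) (fuel : Nat) (acc : List Char), l.length ≤ fuel →
      PySem.Chars.replace.go [c] ['_'] fuel l acc = acc.reverse ++ l.map (repChar c) := by
  intro l
  induction l with
  | nil =>
      intro fuel acc _
      cases fuel <;> simp [PySem.Chars.replace.go]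
  | cons x t ih =>
      intro fuel acc h
      cases fuel with
      | zero => simp at h
      | succ n =>
          simp only [PySem.Chars.replace.go]
          by_cases hx : x = c
          · subst hx
            have hpre : List.isPrefixOf [x] (x :: t) = true := by
              simp [List.isPrefixOf]
            rw [if_pos hpre]
            simp only [List.length, List.drop]
            rw [show (['_'].reverse ++ acc) = '_' :: acc from rfl,
              ih n ('_' :: acc) (by simpa using Nat.le_of_succ_le_succ h)]
            simp [repChar, List.map_cons]
          · have hpre : List.isPrefixOf [c] (x :: t) = false := by
              simp [List.isPrefixOf]
              intro hc; exact absurd hc.symm hx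
            rw [if_neg (by simp [hpre])]
            rw [ih n (x :: acc) (by simpa using Nat.le_of_succ_le_succ h)]
            simp [repChar, hx]

lemma replace_single (c : Char) (l : List Char) :
    PySem.Chars.replace l [c] ['_'] = l.map (repChar c) := by
  simp only [PySem.Chars.replace, List.isEmpty]
  rw [replace_go_single c l l.length [] le_rfl]
  simp

lemma foldl_replace_toList (cs : List String) (s : String)
    (h : ∀ ch ∈ cs, ∃ c, ch.toList = [c]) :
    (cs.foldl (fun s ch => PySem.Str.replace s ch "_") s).toList =
      cs.foldl (fun l ch => l.map (repChar (ch.toList.headD ' '))) s.toList := by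
  induction cs generalizing s with
  | nil => rfl
  | cons ch cs ih =>
      simp only [List.foldl_cons]
      rw [ih _ (fun x hx => h x (List.mem_cons_of_mem _ hx))]
      obtain ⟨c, hc⟩ := h ch (List.mem_cons_self)
      congr 1
      rw [PySem.Str.toList_replace, hc]
      simpa using replace_single c s.toList

-- composing the per-character substitutions over a list of characters
lemma foldl_map_map (cs : List Char) (l : List Char) :
    cs.foldl (fun l c => l.map (repChar c)) l =
      l.map (fun x => cs.foldl (fun y c => repChar c y) x) := by
  induction cs generalizing l with
  | nil => simp
  | cons c cs ih =>
      simp only [List.foldl_cons]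
      rw [ih]
      simp [List.map_map, Function.comp_def]

lemma foldl_rep_eq (cs : List Char) (hund : '_' ∉ cs) (x : Char) :
    cs.foldl (fun y c => repChar c y) x = if x ∈ cs then '_' else x := by
  induction cs generalizing x with
  | nil => simp
  | cons c cs ih =>
      simp only [List.foldl_cons]
      by_cases hx : x = c
      · subst hx
        have h1 : repChar x x = '_' := by simp [repChar]
        rw [h1, ih (fun h => hund (List.mem_cons_of_mem _ h))]
        have : '_' ∉ cs := fun h => hund (List.mem_cons_of_mem _ h)
        simp [this]
      · have h1 : repChar c x = x := by simp [repChar, hx]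
        rw [h1, ih (fun h => hund (List.mem_cons_of_mem _ h))]
        simp [List.mem_cons, hx]

-- the character view of A's dangerous list
def dangerousCharListA : List Char := dangerousStringsA.map (fun ch => ch.toList.headD ' ')

lemma mapped_eq (l : List Char) :
    dangerousCharListA.foldl (fun l c => l.map (repChar c)) l =
      l.map (fun c => if dangerousCharsB.contains c then '_' else c) := by
  rw [foldl_map_map]
  apply List.map_congr_left
  intro x _
  rw [foldl_rep_eq _ (by decide)]
  have hAB : dangerousCharListA = dangerousCharsB := by decide
  rw [hAB]
  by_cases hx : x ∈ dangerousCharsB <;> simp [hx, List.contains_eq_mem]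

lemma aList_eq (field : String) :
    (dangerousStringsA.foldl (fun s ch => PySem.Str.replace s ch "_") field).toList =
      field.toList.map (fun c => if dangerousCharsB.contains c then '_' else c) := by
  rw [foldl_replace_toList _ _ (by intro ch h; fin_cases h <;> exact ⟨_, rfl⟩), ← mapped_eq]
  rfl

-- ===== VERDICT (by name: the statement is the Claim_ definition above) =====
theorem escape_metadata_field_py_spec : Claim_equal_escape_metadata_field_py := by
  intro field _
  unfold Spec_escape_metadata_field_py escape_metadata_field_py escape_metadata_field_py_alt
  set f := dangerousStringsA.foldl (fun s ch => PySem.Str.replace s ch "_") field with hf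
  have hlist : f.toList = field.toList.map (fun c => if dangerousCharsB.contains c then '_' else c) :=
    aList_eq field
  have hslice : ∀ (l : List Char), PySem.Chars.slice l none (some 255) = l.take 255 := by
    intro l
    simpa using PySem.List.slice_to_natCast (xs := l) (b := 255)
  by_cases h : 255 < PySem.Str.len f
  · rw [if_pos h, hlist]
  · rw [if_neg h]
    have hlen : f.toList.length ≤ 255 := by
      have := PySem.Str.len_eq f
      omega
    rw [← hlist, hslice, List.take_of_length_le hlen]
    exact (String.ofList_toList (s := f)).symm
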